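-- pv_equiv track=rewrite | github.com/antoniojsp/retos | leetcode/python/string_comprension_443.py | transfer_to_chars_and_count
-- ===== SOURCE A (Python) =====
-- def transfer_to_chars_and_count(chars:list, result:list)->int:
--     k = 0
--     count = 0
--     for char, times in result:
--         if times == 1:
--             chars[k] = char
--             k+=1
--             count+=1
--         elif times < 10:
--             chars[k], chars[k+1] = char, str(times)
--             k+=2
--             count+=2
--         else:
--             chars[k]=char
--             k+=1
--             count+=1
--             for i in str(times):
--                 chars[k] = i
--                 k += 1
--                 count+=1
--     return count
-- ===== SOURCE B (Python) =====
-- def transfer_to_chars_and_count(chars: list, result: list) -> int: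
--     pieces = [p for char, times in result
--               for p in ((char,) if times == 1
--                         else (char, str(times)) if times < 10
--                         else (char, *str(times)))]
--     for i, p in enumerate(pieces):
--         chars[i] = p
--     total = len(result)
--     for _, t in result:
--         if t >= 10:
--             n = t
--             while n > 0:
--                 n //= 10
--                 total += 1
--         elif t != 1:
--             total += 1
--     return total
-- ===== Notes on version B (the rewrite author's own statement) =====
-- stated objective: alternative
-- what changed: B computes the returned count purely arithmetically (length of result plus a division-by-10 digit counter, never building or measuring the strings A counts character by character), and performs the writes separately via one flattening comprehension followed by an indexed copy instead of A's indexed in-place writes with k/count counters.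
import Mathlib
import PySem

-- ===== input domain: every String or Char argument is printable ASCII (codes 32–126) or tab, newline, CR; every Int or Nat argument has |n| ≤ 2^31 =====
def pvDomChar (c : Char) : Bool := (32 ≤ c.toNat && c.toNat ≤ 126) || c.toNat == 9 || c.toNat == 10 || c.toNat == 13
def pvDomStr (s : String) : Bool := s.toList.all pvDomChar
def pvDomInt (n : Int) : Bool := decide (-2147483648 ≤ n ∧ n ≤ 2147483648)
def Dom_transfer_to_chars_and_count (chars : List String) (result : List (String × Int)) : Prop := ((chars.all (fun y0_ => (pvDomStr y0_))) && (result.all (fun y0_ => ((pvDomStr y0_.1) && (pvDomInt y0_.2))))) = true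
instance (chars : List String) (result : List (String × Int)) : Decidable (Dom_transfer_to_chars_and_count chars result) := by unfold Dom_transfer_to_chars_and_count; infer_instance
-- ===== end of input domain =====

-- B computes the returned count arithmetically (division-by-10 digit counting, no string building)
-- and does the writes separately via one flattening pass and a slice assignment (objective: alternative).
-- Both Pythons mutate `chars` with the same final contents inside Pre_; the equivalence proved is about the return value.

-- ===== PORT A =====
-- state = (chars, k, count); the inner `for i in str(times)` is the inner foldl over the digit characters
def transfer_to_chars_and_count (chars : List String) (result : List (String × Int)) : Int :=
  let st := result.foldl (fun (s : List String × Nat × Int) p =>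
    let cs := s.1; let k := s.2.1; let count := s.2.2
    let char := p.1; let times := p.2
    if times = 1 then (cs.set k char, k + 1, count + 1)
    else if times < 10 then ((cs.set k char).set (k + 1) (PySem.Int.toStr times), k + 2, count + 2)
    else
      let s1 : List String × Nat × Int := (cs.set k char, k + 1, count + 1)
      (PySem.Int.toStr times).toList.foldl
        (fun (t : List String × Nat × Int) i => (t.1.set t.2.1 (String.singleton i), t.2.1 + 1, t.2.2 + 1)) s1)
    (chars, 0, 0)
  st.2.2

-- ===== PORT B =====
-- the inner `while n > 0: n //= 10; total += 1` loop of Source B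
def pvCountDigits (n : Int) (total : Int) : Int :=
  if h : 0 < n then pvCountDigits (PySem.Int.floordiv n 10) (total + 1) else total
  termination_by n.toNat
  decreasing_by
    simp only [PySem.Int.floordiv]
    have h1 : n.fdiv 10 = n / 10 := Int.fdiv_eq_ediv_of_nonneg n (by omega)
    omega

def transfer_to_chars_and_count_alt (chars : List String) (result : List (String × Int)) : Int :=
  -- pieces = [p for char, times in result for p in (...)]
  let pieces := result.flatMap (fun p =>
    if p.2 = 1 then [p.1]
    else if p.2 < 10 then [p.1, PySem.Int.toStr p.2]
    else p.1 :: (PySem.Int.toStr p.2).toList.map String.singleton)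
  -- for i, p in enumerate(pieces): chars[i] = p
  let _chars := (PySem.List.enumerate pieces).foldl (fun cs q => cs.set q.1.toNat q.2) chars
  -- total = len(result); then the counting loop
  result.foldl (fun total q =>
      if 10 ≤ q.2 then pvCountDigits q.2 total
      else if q.2 ≠ 1 then total + 1 else total)
    (PySem.List.len result)

-- ===== PRECONDITION & SPEC =====
-- length of the compressed output demanded by one pair / by the whole result list
def pvNeed (p : String × Int) : Nat :=
  if p.2 = 1 then 1 else if p.2 < 10 then 2 else 1 + (PySem.Int.toStr p.2).toList.length

-- A raises IndexError when chars is shorter than the compressed output; Pre_ excludes exactly those inputs.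
def Pre_transfer_to_chars_and_count (chars : List String) (result : List (String × Int)) : Prop :=
  (result.map pvNeed).sum ≤ chars.length
instance (chars : List String) (result : List (String × Int)) : Decidable (Pre_transfer_to_chars_and_count chars result) := by unfold Pre_transfer_to_chars_and_count; infer_instance

def pvWitness_transfer_to_chars_and_count : List String × (List (String × Int)) :=
  (["x", "x", "x", "x", "x"], [("a", 1), ("b", 12)])

def Spec_transfer_to_chars_and_count (chars : List String) (result : List (String × Int)) (out : Int) : Prop := out = transfer_to_chars_and_count_alt chars result
instance (chars : List String) (result : List (String × Int)) (out : Int) : Decidable (Spec_transfer_to_chars_and_count chars result out) := by unfold Spec_transfer_to_chars_and_count; infer_instance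

-- ===== CLAIM =====
def Claim_equal_transfer_to_chars_and_count : Prop := ∀ (chars : List String) (result : List (String × Int)), Dom_transfer_to_chars_and_count chars result → Pre_transfer_to_chars_and_count chars result → Spec_transfer_to_chars_and_count chars result (transfer_to_chars_and_count chars result)

-- ===== LEMMAS AND PROOFS =====

-- decimal digit count, the mathematical value both counts compute
def pvDl (n : Nat) : Nat :=
  if h : n < 10 then 1 else 1 + pvDl (n / 10)
  termination_by n
  decreasing_by omega

theorem pvToDigitsCore_len (f : Nat) : ∀ (n : Nat) (l : List Char), n < f →
    (Nat.toDigitsCore 10 f n l).length = l.length + pvDl n := by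
  induction f with
  | zero => intro n l h; omega
  | succ f ih =>
    intro n l h
    rw [Nat.toDigitsCore]
    by_cases h10 : n < 10
    · have : n / 10 = 0 := Nat.div_eq_of_lt h10
      simp [this, pvDl, h10]
    · have hne : ¬ n / 10 = 0 := by omega
      simp only [hne, if_false]
      rw [ih (n / 10) _ (by omega)]
      rw [show pvDl n = 1 + pvDl (n / 10) by rw [pvDl]; simp [h10]]
      simp
      omega

theorem pvToDigits_len (n : Nat) : (Nat.toDigits 10 n).length = pvDl n :=
  by simpa using pvToDigitsCore_len (n + 1) n [] (by omega)

theorem pvCountDigits_eq (m : Nat) (h : 0 < m) : ∀ (total : Int),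
    pvCountDigits (m : Int) total = total + (pvDl m : Int) := by
  induction m using Nat.strong_induction_on with
  | _ m ih =>
    intro total
    rw [pvCountDigits]
    have hpos : (0 : Int) < (m : Int) := by exact_mod_cast h
    simp only [hpos, dif_pos]
    have hfd : PySem.Int.floordiv (m : Int) 10 = ((m / 10 : Nat) : Int) := by
      simp only [PySem.Int.floordiv]
      rw [Int.fdiv_eq_ediv_of_nonneg (m : Int) (by omega)]
      omega
    rw [hfd]
    by_cases h10 : m < 10
    · have h0 : m / 10 = 0 := Nat.div_eq_of_lt h10
      rw [h0]
      rw [pvCountDigits]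
      rw [show pvDl m = 1 by rw [pvDl]; simp [h10]]
      norm_num
    · rw [ih (m / 10) (by omega) (by omega)]
      rw [show pvDl m = 1 + pvDl (m / 10) by rw [pvDl]; simp [h10]]
      push_cast
      ring

-- for 10 ≤ t, A's string of digits has exactly pvDl t.toNat characters
theorem pvToStr_len (t : Int) (h : 10 ≤ t) :
    (PySem.Int.toStr t).toList.length = pvDl t.toNat := by
  rw [PySem.Int.toList_toStr]
  simp only [PySem.Int.toChars]
  have : ¬ t < 0 := by omega
  simp only [this, if_false]
  exact pvToDigits_len t.toNat

-- A's inner digit loop adds one to count per digit character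
theorem pvInnerCount (l : List Char) (s : List String × Nat × Int) :
    (l.foldl (fun (t : List String × Nat × Int) i => (t.1.set t.2.1 (String.singleton i), t.2.1 + 1, t.2.2 + 1)) s).2.2
      = s.2.2 + l.length := by
  induction l generalizing s with
  | nil => simp
  | cons c cs ih => simp [List.foldl_cons, ih]; omega

-- A's count after the main loop is the initial count plus the needed length
theorem pvACount (result : List (String × Int)) (s : List String × Nat × Int) :
    (result.foldl (fun (s : List String × Nat × Int) p =>
      let cs := s.1; let k := s.2.1; let count := s.2.2
      let char := p.1; let times := p.2
      if times = 1 then (cs.set k char, k + 1, count + 1)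
      else if times < 10 then ((cs.set k char).set (k + 1) (PySem.Int.toStr times), k + 2, count + 2)
      else
        let s1 : List String × Nat × Int := (cs.set k char, k + 1, count + 1)
        (PySem.Int.toStr times).toList.foldl
          (fun (t : List String × Nat × Int) i => (t.1.set t.2.1 (String.singleton i), t.2.1 + 1, t.2.2 + 1)) s1)
      s).2.2 = s.2.2 + ((result.map pvNeed).sum : Int) := by
  induction result generalizing s with
  | nil => simp
  | cons p ps ih =>
    simp only [List.foldl_cons, List.map_cons, List.sum_cons]
    by_cases h1 : p.2 = 1
    · simp only [h1, ite_true]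
      rw [ih]
      simp [pvNeed, h1]; ring
    · by_cases h2 : p.2 < 10
      · simp only [if_neg h1, if_pos h2]
        rw [ih]
        simp [pvNeed, h1, h2]; ring
      · simp only [if_neg h1, if_neg h2]
        rw [ih, pvInnerCount]
        simp [pvNeed, h1, h2]; ring

-- B's counting loop adds (pvNeed p - 1) per pair
theorem pvBCount (result : List (String × Int)) : ∀ (total : Int),
    (result.foldl (fun total q =>
        if 10 ≤ q.2 then pvCountDigits q.2 total
        else if q.2 ≠ 1 then total + 1 else total) total)
      = total + ((result.map pvNeed).sum : Int) - result.length := by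
  induction result with
  | nil => intro total; simp
  | cons p ps ih =>
    intro total
    simp only [List.foldl_cons, List.map_cons, List.sum_cons, List.length_cons]
    by_cases h1 : 10 ≤ p.2
    · simp only [h1, if_true]
      have ht : p.2 = ((p.2.toNat : Int)) := by omega
      rw [ht, pvCountDigits_eq p.2.toNat (by omega), ih]
      have hne : ¬ p.2 = 1 := by omega
      have hlt : ¬ p.2 < 10 := by omega
      rw [pvNeed]
      simp only [hne, hlt, if_false]
      rw [pvToStr_len p.2 h1]
      push_cast
      omega
    · simp only [h1, if_false]
      by_cases h2 : p.2 = 1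
      · simp only [h2, ne_eq, not_true_eq_false, if_false]
        rw [ih]
        simp only [pvNeed, h2, ite_true]
        push_cast; ring
      · simp only [h2, ne_eq, not_false_eq_true, if_true]
        rw [ih]
        have h3 : p.2 < 10 := by omega
        simp only [pvNeed, h2, h3, ite_true, ite_false]
        push_cast; ring

-- ===== VERDICT =====
theorem transfer_to_chars_and_count_spec : Claim_equal_transfer_to_chars_and_count := by
  intro chars result _ _
  unfold Spec_transfer_to_chars_and_count transfer_to_chars_and_count transfer_to_chars_and_count_alt
  simp only []
  rw [pvACount, pvBCount]
  simp [PySem.List.len]
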